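-- pv_equiv track=rewrite | github.com/shivpandey02/CodePractice | vipul_codechef/HOLES.py | holes_in_index
-- ===== SOURCE A (Python) =====
-- def holes_in_index(string):
--     hole = ["A", "D", "O", "P", "R",'Q']
--     count = 0
--     for i in string:
--         if i in hole:
--             count+=1
--         if i == 'B':
--             count+=2
--     return count
-- ===== SOURCE B (Python) =====
-- def holes_in_index(string):
--     # table-driven: one scan per hole-bearing letter via str.count, weighted sum
--     weights = {'A': 1, 'D': 1, 'O': 1, 'P': 1, 'Q': 1, 'R': 1, 'B': 2}
--     total = 0
--     for letter, weight in weights.items():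
--         total += string.count(letter) * weight
--     return total
-- ===== Notes on version B (the rewrite author's own statement) =====
-- stated objective: faster
-- what changed: Replaces the per-character Python loop with membership tests by a fixed letter-to-weight table iterated once, summing string.count(letter)*weight per hole-bearing letter (the scans run in C via str.count).
import Mathlib
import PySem

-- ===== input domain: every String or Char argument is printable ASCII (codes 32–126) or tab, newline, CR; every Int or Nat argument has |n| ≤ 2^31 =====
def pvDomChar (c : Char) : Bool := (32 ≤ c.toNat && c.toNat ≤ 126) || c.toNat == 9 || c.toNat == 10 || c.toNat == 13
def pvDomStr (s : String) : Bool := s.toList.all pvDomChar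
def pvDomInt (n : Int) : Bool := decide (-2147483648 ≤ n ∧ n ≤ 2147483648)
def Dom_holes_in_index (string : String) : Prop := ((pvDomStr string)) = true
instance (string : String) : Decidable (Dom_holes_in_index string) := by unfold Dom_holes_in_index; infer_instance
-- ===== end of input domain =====

-- B iterates a fixed letter→weight table, summing string.count(letter)*weight; same result, different pass shape.

-- ===== PORT A =====
def holes_in_index (string : String) : Int :=
  let hole : List Char := ['A', 'D', 'O', 'P', 'R', 'Q']
  string.toList.foldl (fun count i =>
    let count := if i ∈ hole then count + 1 else count
    if i = 'B' then count + 2 else count) 0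

-- ===== PORT B =====
def holesWeights : List (Char × Int) :=
  [('A', 1), ('D', 1), ('O', 1), ('P', 1), ('Q', 1), ('R', 1), ('B', 2)]

def holes_in_index_alt (string : String) : Int :=
  holesWeights.foldl
    (fun total lw => total + (PySem.Str.count string (String.ofList [lw.1]) : Int) * lw.2) 0

-- ===== PRECONDITION & SPEC =====
def Spec_holes_in_index (string : String) (out : Int) : Prop := out = holes_in_index_alt string
instance (string : String) (out : Int) : Decidable (Spec_holes_in_index string out) := by unfold Spec_holes_in_index; infer_instance

-- ===== CLAIM (what is proved, stated in full; the proofs are below) =====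
def Claim_equal_holes_in_index : Prop := ∀ (string : String), Dom_holes_in_index string → Spec_holes_in_index string (holes_in_index string)

-- ===== LEMMAS AND PROOFS =====

-- str.count with a single-character needle counts that character.
theorem chars_count_go_single (c : Char) (l : List Char) (fuel acc : ℕ) (h : l.length ≤ fuel) :
    PySem.Chars.count.go [c] fuel l acc = acc + l.count c := by
  induction l generalizing fuel acc with
  | nil => cases fuel <;> simp [PySem.Chars.count.go]
  | cons hd t ih =>
    cases fuel with
    | zero => simp at h
    | succ f =>
      have hf : t.length ≤ f := by simpa using h
      by_cases hc : c = hd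
      · subst hc
        simp only [PySem.Chars.count.go, List.isPrefixOf, beq_self_eq_true, Bool.true_and, if_true]
        simp only [List.length_singleton, List.drop_succ_cons, List.drop_zero]
        rw [ih f (acc + 1) hf, List.count_cons]
        simp; omega
      · simp only [PySem.Chars.count.go, List.isPrefixOf, Bool.and_true]
        rw [if_neg (by simpa using hc), ih f acc hf, List.count_cons]
        simp [Ne.symm hc]

theorem chars_count_single (cs : List Char) (c : Char) :
    PySem.Chars.count cs [c] = cs.count c := by
  simp [PySem.Chars.count, chars_count_go_single c cs cs.length 0 le_rfl]

-- A's per-character loop computes the weighted character counts.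
theorem foldA_counts (l : List Char) (a : Int) :
    l.foldl (fun count i =>
      let count := if i ∈ (['A', 'D', 'O', 'P', 'R', 'Q'] : List Char) then count + 1 else count
      if i = 'B' then count + 2 else count) a
    = a + (l.count 'A' : Int) + (l.count 'D' : Int) + (l.count 'O' : Int)
        + (l.count 'P' : Int) + (l.count 'R' : Int) + (l.count 'Q' : Int)
        + 2 * (l.count 'B' : Int) := by
  induction l generalizing a with
  | nil => simp
  | cons hd t ih =>
    simp only [List.foldl_cons, ih, List.count_cons]
    by_cases hA : hd = 'A' <;> by_cases hD : hd = 'D' <;> by_cases hO : hd = 'O' <;>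
      by_cases hP : hd = 'P' <;> by_cases hR : hd = 'R' <;> by_cases hQ : hd = 'Q' <;>
      by_cases hB : hd = 'B' <;>
      simp_all <;> ring

-- ===== VERDICT (by name: the statement is the Claim_ definition above) =====
theorem holes_in_index_spec : Claim_equal_holes_in_index := by
  intro s _
  show holes_in_index s = holes_in_index_alt s
  have hmk : ∀ c : Char, (String.ofList [c]).toList = [c] := fun _ => by simp
  simp only [holes_in_index, holes_in_index_alt, holesWeights, List.foldl_cons, List.foldl_nil,
    PySem.Str.count_eq, hmk, chars_count_single, foldA_counts]
  ring
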